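-- pv_equiv track=rewrite | github.com/toast674/one-player-mahjong-simulator | calc.py | set_hand
-- ===== SOURCE A (Python) =====
-- TILES = 34
--
-- TRANS = {'m':0, 'M':0, 'p':9, 'P':9, 's':18, 'S':18, 'z':27}
--
-- def set_hand(hai):
--   hand = [0]*TILES
--   suite = 0
--
--   for elem in reversed(hai):
--     try:
--       num = suite+int(elem)-1
--       hand[num] = hand[num]+1
--     except:
--       suite = TRANS[elem]
--   return hand
-- ===== SOURCE B (Python) =====
-- TILES = 34
--
-- TRANS = {'m':0, 'M':0, 'p':9, 'P':9, 's':18, 'S':18, 'z':27}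
--
-- def set_hand(hai):
--   hand = [0]*TILES
--   buf = []
--   for elem in hai:
--     try:
--       buf.append(int(elem))
--     except:
--       suit = TRANS[elem]
--       for d in buf:
--         hand[suit+d-1] += 1
--       buf = []
--   for d in buf:
--     hand[0+d-1] += 1
--   return hand
-- ===== Notes on version B (the rewrite author's own statement) =====
-- stated objective: alternative
-- what changed: B parses the string forward with a pending-digit buffer that is flushed into the counts at each suit letter (trailing digits flushed with suit 0), instead of A's reversed scan that carries the current suit.
import Mathlib
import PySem

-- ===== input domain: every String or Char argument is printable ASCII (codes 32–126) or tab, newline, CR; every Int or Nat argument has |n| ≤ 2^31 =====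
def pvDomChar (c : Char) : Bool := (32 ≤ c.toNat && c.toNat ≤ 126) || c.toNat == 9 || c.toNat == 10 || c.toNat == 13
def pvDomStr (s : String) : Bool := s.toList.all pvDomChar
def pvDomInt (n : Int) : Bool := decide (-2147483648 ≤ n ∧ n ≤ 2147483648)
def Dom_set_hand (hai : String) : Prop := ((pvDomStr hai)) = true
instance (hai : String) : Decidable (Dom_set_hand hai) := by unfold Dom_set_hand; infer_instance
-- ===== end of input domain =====

-- B replaces A's reversed scan (carrying the current suit) by a forward pass with a pending-digit
-- buffer flushed at each suit letter; objective: alternative decomposition (no speed claim).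

-- ===== PORT A =====

-- TRANS = {'m':0, 'M':0, 'p':9, 'P':9, 's':18, 'S':18, 'z':27}
def pvTrans : PySem.Dict Char Int :=
  ⟨[('m', 0), ('M', 0), ('p', 9), ('P', 9), ('s', 18), ('S', 18), ('z', 27)]⟩

-- int(elem) for a SINGLE printable-ASCII char: exact there — succeeds iff the char is a decimal digit
def pvIntChar? (c : Char) : Option Int :=
  if c.isDigit then some ((c.toNat : Int) - 48) else none

-- hand[num] = hand[num] + 1 (Python read + write, negative index from the end; none = IndexError)
def pvIncr? (h : List Int) (i : Int) : Option (List Int) :=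
  (PySem.List.pyGet? h i).bind (fun v => PySem.List.pySet? h i (v + 1))

-- one iteration of A's loop body: try the num/assignment, bare except → suite = TRANS[elem]
def pvStepA (st : List Int × Int) (c : Char) : Option (List Int × Int) :=
  match (pvIntChar? c).bind (fun d => (pvIncr? st.1 (st.2 + d - 1)).map (fun h => (h, st.2))) with
  | some st' => some st'
  | none => (PySem.Dict.get? pvTrans c).map (fun s => (st.1, s))

-- A raises on inputs outside Pre_set_hand; the port returns [] there
def set_hand (hai : String) : List Int :=
  match hai.toList.reverse.foldl (fun o c => o.bind (fun st => pvStepA st c))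
      (some (List.replicate 34 0, (0 : Int))) with
  | some (h, _) => h
  | none => []

-- ===== PORT B =====

-- for d in buf: hand[suit+d-1] += 1
def pvFlush? (h : List Int) (s : Int) (buf : List Int) : Option (List Int) :=
  buf.foldl (fun o d => o.bind (fun h' => pvIncr? h' (s + d - 1))) (some h)

-- one iteration of B's loop: try buffering int(elem); except → look up the suit and flush the buffer
def pvStepB (st : List Int × List Int) (c : Char) : Option (List Int × List Int) :=
  match pvIntChar? c with
  | some d => some (st.1, st.2 ++ [d])
  | none =>
    match PySem.Dict.get? pvTrans c with
    | some s => (pvFlush? st.1 s st.2).map (fun h => (h, ([] : List Int)))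
    | none => none

def set_hand_alt (hai : String) : List Int :=
  match (hai.toList.foldl (fun o c => o.bind (fun st => pvStepB st c))
          (some (List.replicate 34 0, ([] : List Int)))).bind
        (fun st => pvFlush? st.1 0 st.2) with
  | some h => h
  | none => []

-- ===== PRECONDITION & SPEC =====
-- Pre_ excludes exactly the inputs where Python A raises: a char that is neither a digit nor a TRANS
-- key (KeyError), or a digit 8/9 whose nearest letter to the right is 'z' (index ≥ 34: IndexError, then KeyError).
def pvNoZ89 (l : List Char) (j : Nat) : Bool :=
  !(l.getD j ' ' == 'z') || ((l.take j).reverse.takeWhile Char.isDigit).all (fun c => c != '8' && c != '9')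

def Pre_set_hand (hai : String) : Prop :=
  hai.toList.all (fun c => c.isDigit || ['m', 'M', 'p', 'P', 's', 'S', 'z'].contains c) = true ∧
  (List.range hai.toList.length).all (pvNoZ89 hai.toList) = true
instance (hai : String) : Decidable (Pre_set_hand hai) := by unfold Pre_set_hand; infer_instance

def pvWitness_set_hand : String := "123m55z"

def Spec_set_hand (hai : String) (out : List Int) : Prop := out = set_hand_alt hai
instance (hai : String) (out : List Int) : Decidable (Spec_set_hand hai out) := by unfold Spec_set_hand; infer_instance

-- ===== CLAIM (what is proved, stated in full; the proofs are below) =====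
def Claim_equal_set_hand : Prop := ∀ (hai : String), Dom_set_hand hai → Pre_set_hand hai → Spec_set_hand hai (set_hand hai)

-- ===== LEMMAS AND PROOFS =====

-- A's run, structurally: rightmost char first (foldl over the reversed list = this recursion)
def pvArH (h : List Int) : List Char → Option (List Int × Int)
  | [] => some (h, 0)
  | c :: t => (pvArH h t).bind (fun st => pvStepA st c)

theorem pv_foldl_bind_none {α β : Type} (f : α → β → Option α) (l : List β) :
    l.foldl (fun o c => o.bind (fun a => f a c)) none = none := by
  induction l with
  | nil => rfl
  | cons c t ih => simpa using ih

theorem pv_flush_nil (h : List Int) (s : Int) : pvFlush? h s [] = some h := rfl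

theorem pv_flush_cons (h : List Int) (s b : Int) (rest : List Int) :
    pvFlush? h s (b :: rest) = (pvIncr? h (s + b - 1)).bind (fun h' => pvFlush? h' s rest) := by
  unfold pvFlush?
  rw [List.foldl_cons, Option.bind_some]
  cases hinc : pvIncr? h (s + b - 1) with
  | none => rw [Option.bind_none]; exact pv_foldl_bind_none (fun h' d => pvIncr? h' (s + d - 1)) rest
  | some h' => rw [Option.bind_some]

theorem pv_flush_append (h : List Int) (s d : Int) (buf : List Int) :
    pvFlush? h s (buf ++ [d]) = (pvFlush? h s buf).bind (fun h' => pvIncr? h' (s + d - 1)) := by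
  induction buf generalizing h with
  | nil => simp [pv_flush_nil, pv_flush_cons]
  | cons b rest ih =>
    rw [List.cons_append, pv_flush_cons, pv_flush_cons]
    cases pvIncr? h (s + b - 1) with
    | none => rfl
    | some h' => simpa using ih h'

-- characterize pvIncr? through the normalized index
theorem pv_incr_eq (h : List Int) (i : Int) :
    pvIncr? h i = (PySem.List.pyIdx? h.length i).map (fun k => h.set k (h.getD k 0 + 1)) := by
  unfold pvIncr?
  simp only [PySem.List.pyGet?, PySem.List.pySet?]
  cases hk : PySem.List.pyIdx? h.length i with
  | none => rfl
  | some k =>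
    have hlt : k < h.length := by
      simp only [PySem.List.pyIdx?] at hk
      split at hk
      · split at hk
        · cases hk; omega
        · exact absurd hk (by simp)
      · split at hk
        · cases hk; omega
        · exact absurd hk (by simp)
    simp [List.getElem?_eq_getElem hlt, List.getD]

-- the two single-index increments commute
theorem pv_incr_incr_comm (h : List Int) (i j : Int) :
    (pvIncr? h i).bind (fun h' => pvIncr? h' j) = (pvIncr? h j).bind (fun h' => pvIncr? h' i) := by
  rw [pv_incr_eq h i, pv_incr_eq h j]
  cases hki : PySem.List.pyIdx? h.length i with
  | none =>
    cases hkj : PySem.List.pyIdx? h.length j with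
    | none => rfl
    | some kj =>
      simp only [Option.map_some, Option.map_none, Option.bind_none, Option.bind_some]
      rw [pv_incr_eq]
      simp [hki]
  | some ki =>
    cases hkj : PySem.List.pyIdx? h.length j with
    | none =>
      simp only [Option.map_some, Option.map_none, Option.bind_none, Option.bind_some]
      rw [pv_incr_eq]
      simp [hkj]
    | some kj =>
      simp only [Option.map_some, Option.bind_some]
      rw [pv_incr_eq, pv_incr_eq]
      simp only [List.length_set, hki, hkj, Option.map_some]
      by_cases hk : ki = kj
      · subst hk; rfl
      · have h1 : (h.set ki (h.getD ki 0 + 1)).getD kj 0 = h.getD kj 0 := by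
          simp [List.getD, List.getElem?_set_ne hk]
        have h2 : (h.set kj (h.getD kj 0 + 1)).getD ki 0 = h.getD ki 0 := by
          simp [List.getD, List.getElem?_set_ne (Ne.symm hk)]
        rw [h1, h2, List.set_comm _ _ hk]

-- a flush commutes with a later single increment
theorem pv_flush_incr_comm (buf : List Int) (h : List Int) (s i : Int) :
    (pvFlush? h s buf).bind (fun h' => pvIncr? h' i)
      = (pvIncr? h i).bind (fun h' => pvFlush? h' s buf) := by
  induction buf generalizing h with
  | nil =>
    simp only [pv_flush_nil, Option.bind_some]
    cases pvIncr? h i with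
    | none => rfl
    | some h' => rfl
  | cons b rest ih =>
    have key := pv_incr_incr_comm h (s + b - 1) i
    rw [pv_flush_cons, Option.bind_assoc]
    cases hinc : pvIncr? h (s + b - 1) with
    | none =>
      rw [hinc] at key
      rw [Option.bind_none]
      calc none = ((pvIncr? h i).bind (fun h' => pvIncr? h' (s + b - 1))).bind
            (fun h'' => pvFlush? h'' s rest) := by rw [← key]; rfl
        _ = (pvIncr? h i).bind (fun h' => pvFlush? h' s (b :: rest)) := by
            rw [Option.bind_assoc]
            exact congrArg _ (funext fun h' => (pv_flush_cons h' s b rest).symm)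
    | some h' =>
      rw [hinc, Option.bind_some] at key
      rw [Option.bind_some, ih h']
      calc (pvIncr? h' i).bind (fun h'' => pvFlush? h'' s rest)
          = ((pvIncr? h i).bind (fun h'' => pvIncr? h'' (s + b - 1))).bind
              (fun h'' => pvFlush? h'' s rest) := by rw [← key]
        _ = (pvIncr? h i).bind (fun h'' => pvFlush? h'' s (b :: rest)) := by
            rw [Option.bind_assoc]
            exact congrArg _ (funext fun h'' => (pv_flush_cons h'' s b rest).symm)

-- TRANS has no digit keys
theorem pv_trans_digit_none (c : Char) (hd : c.isDigit = true) :
    PySem.Dict.get? pvTrans c = none := by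
  have key : ∀ x : Char, x.isDigit = false → (x == c) = false := by
    intro x hx
    cases hbe : (x == c) with
    | false => rfl
    | true =>
      have hxc : x = c := beq_iff_eq.mp hbe
      rw [hxc, hd] at hx
      cases hx
  simp [PySem.Dict.get?, pvTrans, List.find?, key 'm' (by decide), key 'M' (by decide),
    key 'p' (by decide), key 'P' (by decide), key 's' (by decide), key 'S' (by decide),
    key 'z' (by decide)]

-- A's step on a digit char
theorem pv_stepA_digit (st : List Int × Int) (c : Char) (d : Int)
    (hd : pvIntChar? c = some d) :
    pvStepA st c = (pvIncr? st.1 (st.2 + d - 1)).bind (fun h => some (h, st.2)) := by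
  have hdig : c.isDigit = true := by
    by_contra hnd
    simp [pvIntChar?, Bool.of_not_eq_true hnd] at hd
  unfold pvStepA
  rw [hd, Option.bind_some]
  cases hinc : pvIncr? st.1 (st.2 + d - 1) with
  | none => simp [pv_trans_digit_none c hdig]
  | some h => simp

-- A's step on a non-digit char
theorem pv_stepA_letter (st : List Int × Int) (c : Char) (hnd : pvIntChar? c = none) :
    pvStepA st c = (PySem.Dict.get? pvTrans c).map (fun s => (st.1, s)) := by
  unfold pvStepA
  rw [hnd, Option.bind_none]

-- one A-step commutes with a pending flush
theorem pv_step_flush_comm (st : List Int × Int) (c : Char) (s0 : Int) (buf : List Int) :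
    (pvFlush? st.1 s0 buf).bind (fun hh => pvStepA (hh, st.2) c)
      = (pvStepA st c).bind (fun st' => (pvFlush? st'.1 s0 buf).map (fun hh => (hh, st'.2))) := by
  cases hc : pvIntChar? c with
  | some d =>
    have hcomm := pv_flush_incr_comm buf st.1 s0 (st.2 + d - 1)
    calc (pvFlush? st.1 s0 buf).bind (fun hh => pvStepA (hh, st.2) c)
        = ((pvFlush? st.1 s0 buf).bind (fun hh => pvIncr? hh (st.2 + d - 1))).bind
            (fun h => some (h, st.2)) := by
          rw [Option.bind_assoc]
          exact congrArg _ (funext fun hh => pv_stepA_digit (hh, st.2) c d hc)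
      _ = ((pvIncr? st.1 (st.2 + d - 1)).bind (fun h' => pvFlush? h' s0 buf)).bind
            (fun h => some (h, st.2)) := by rw [hcomm]
      _ = (pvStepA st c).bind (fun st' => (pvFlush? st'.1 s0 buf).map (fun hh => (hh, st'.2))) := by
          rw [pv_stepA_digit st c d hc, Option.bind_assoc, Option.bind_assoc]
          refine congrArg _ (funext fun h' => ?_)
          simp only [Option.bind_some]
          cases pvFlush? h' s0 buf <;> rfl
  | none =>
    rw [pv_stepA_letter st c hc]
    cases hg : PySem.Dict.get? pvTrans c with
    | none =>
      rw [Option.map_none, Option.bind_none]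
      cases pvFlush? st.1 s0 buf with
      | none => rfl
      | some hh => rw [Option.bind_some, pv_stepA_letter _ c hc, hg, Option.map_none]
    | some s1 =>
      rw [Option.map_some, Option.bind_some]
      cases pvFlush? st.1 s0 buf with
      | none => rfl
      | some hh => rw [Option.bind_some, pv_stepA_letter _ c hc, hg]; rfl

-- a flush of the pending buffer commutes with A's whole remaining run
theorem pv_flush_arH_comm (t : List Char) (h : List Int) (s0 : Int) (buf : List Int) :
    (pvFlush? h s0 buf).bind (fun h' => pvArH h' t)
      = (pvArH h t).bind (fun st => (pvFlush? st.1 s0 buf).map (fun hh => (hh, st.2))) := by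
  induction t generalizing h with
  | nil =>
    simp only [pvArH, Option.bind_some]
    cases pvFlush? h s0 buf <;> rfl
  | cons c t' ih =>
    simp only [pvArH]
    rw [← Option.bind_assoc, ih, Option.bind_assoc, Option.bind_assoc]
    refine congrArg _ (funext fun st => ?_)
    cases hf : pvFlush? st.1 s0 buf with
    | none =>
      rw [Option.map_none, Option.bind_none]
      have := pv_step_flush_comm st c s0 buf
      rw [hf, Option.bind_none] at this
      exact this.symm ▸ rfl
    | some hh =>
      have := pv_step_flush_comm st c s0 buf
      rw [hf, Option.bind_some] at this
      rw [Option.map_some, Option.bind_some, ← this]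

-- MAIN INVARIANT: B's forward fold from (h, buf) followed by the final flush equals
-- A's right-to-left run from h, flushing buf with the suit A ends in
theorem pv_main (l : List Char) (h : List Int) (buf : List Int) :
    (l.foldl (fun o c => o.bind (fun st => pvStepB st c)) (some (h, buf))).bind
        (fun st => pvFlush? st.1 0 st.2)
      = (pvArH h l).bind (fun st => pvFlush? st.1 st.2 buf) := by
  induction l generalizing h buf with
  | nil => simp [pvArH]
  | cons c t ih =>
    rw [List.foldl_cons, Option.bind_some]
    simp only [pvArH]
    cases hc : pvIntChar? c with
    | some d =>
      have hstep : pvStepB (h, buf) c = some (h, buf ++ [d]) := by simp [pvStepB, hc]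
      rw [hstep, ih, Option.bind_assoc]
      refine congrArg _ (funext fun st => ?_)
      rw [pv_flush_append, pv_flush_incr_comm, pv_stepA_digit st c d hc, Option.bind_assoc]
      exact congrArg _ (funext fun h' => by rw [Option.bind_some])
    | none =>
      cases hg : PySem.Dict.get? pvTrans c with
      | none =>
        have hstep : pvStepB (h, buf) c = none := by simp [pvStepB, hc, hg]
        rw [hstep, pv_foldl_bind_none (fun st c => pvStepB st c) t, Option.bind_none,
            Option.bind_assoc]
        symm
        cases pvArH h t with
        | none => rfl
        | some st => rw [Option.bind_some, pv_stepA_letter st c hc, hg, Option.map_none]; rfl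
      | some s0 =>
        have hstep : pvStepB (h, buf) c = (pvFlush? h s0 buf).map (fun hh => (hh, ([] : List Int))) := by
          simp [pvStepB, hc, hg]
        have hcomm := pv_flush_arH_comm t h s0 buf
        have hrhs : ((pvArH h t).bind fun y => (pvStepA y c).bind fun st => pvFlush? st.1 st.2 buf)
            = (pvArH h t).bind (fun st => pvFlush? st.1 s0 buf) := by
          refine congrArg _ (funext fun st => ?_)
          rw [pv_stepA_letter st c hc, hg, Option.map_some, Option.bind_some]
        rw [hstep, Option.bind_assoc, hrhs]
        cases hf : pvFlush? h s0 buf with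
        | none =>
          rw [hf, Option.bind_none] at hcomm
          rw [Option.map_none, pv_foldl_bind_none (fun st c => pvStepB st c) t, Option.bind_none]
          symm
          cases harr : pvArH h t with
          | none => rfl
          | some st =>
            rw [harr, Option.bind_some] at hcomm
            rw [Option.bind_some]
            cases hf2 : pvFlush? st.1 s0 buf with
            | none => rfl
            | some hh => rw [hf2, Option.map_some] at hcomm; cases hcomm
        | some h' =>
          rw [hf, Option.bind_some] at hcomm
          rw [Option.map_some, ih h' [], hcomm, Option.bind_assoc]
          refine congrArg _ (funext fun st => ?_)
          cases pvFlush? st.1 s0 buf with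
          | none => rfl
          | some hh => rw [Option.map_some, Option.bind_some, pv_flush_nil]
  -- end

-- A's fold over the reversed list is pvArH
theorem pv_A_eq_arH (l : List Char) :
    l.reverse.foldl (fun o c => o.bind (fun st => pvStepA st c))
        (some (List.replicate 34 0, (0 : Int)))
      = pvArH (List.replicate 34 0) l := by
  rw [List.foldl_reverse]
  induction l with
  | nil => rfl
  | cons c t ih => rw [List.foldr_cons, ih]; rfl

-- ===== VERDICT (by name: the statement is the Claim_ definition above) =====
theorem set_hand_spec : Claim_equal_set_hand := by
  intro hai _ _
  unfold Spec_set_hand set_hand set_hand_alt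
  rw [pv_A_eq_arH, pv_main]
  cases pvArH (List.replicate 34 0) hai.toList with
  | none => rfl
  | some st => rw [Option.bind_some, pv_flush_nil]
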